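-- pv_equiv track=rewrite | github.com/yeos60490/algorithm | programmers/모의고사.py | solution
-- ===== SOURCE A (Python) =====
-- def solution(answers):
--     corr = {1:0,2:0,3:0}
--     one, len_one = [1,2,3,4,5], 5
--     two, len_two = [2,1,2,3,2,4,2,5], 8
--     three, len_three = [3,3,1,1,2,2,4,4,5,5], 10
--
--     for i in range(len(answers)):
--         if answers[i] == one[int(i%len_one)]:
--             corr[1] += 1
--         if answers[i] == two[int(i%len_two)]:
--             corr[2]  += 1
--         if answers[i] == three[int(i%len_three)]:
--             corr[3] += 1
--
--     maximum = max(corr.values())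
--     ans = []
--     for i in corr:
--         if maximum == corr[i]:
--             ans.append(i)
--
--     return ans
-- ===== SOURCE B (Python) =====
-- def solution(answers):
--     # One pass builds a histogram keyed by (position mod 40, answer); since every
--     # pattern period (5, 8, 10) divides 40, each score is then read off the table
--     # without touching answers again.
--     cnt = {}
--     for i, a in enumerate(answers):
--         key = (i % 40, a)
--         cnt[key] = cnt.get(key, 0) + 1
--     patterns = [[1, 2, 3, 4, 5],
--                 [2, 1, 2, 3, 2, 4, 2, 5],
--                 [3, 3, 1, 1, 2, 2, 4, 4, 5, 5]]
--     scores = [sum(cnt.get((r, pat[r % len(pat)]), 0) for r in range(40))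
--               for pat in patterns]
--     m = max(scores)
--     return [k + 1 for k, s in enumerate(scores) if s == m]
-- ===== Notes on version B (the rewrite author's own statement) =====
-- stated objective: alternative
-- what changed: A compares every answer against all three patterns inside one loop updating a score dict; B makes one pass building a histogram keyed by (index mod 40, answer) and then computes each pattern's score purely from the 40-entry table (each pattern period divides 40), never re-reading answers.
import Mathlib
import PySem

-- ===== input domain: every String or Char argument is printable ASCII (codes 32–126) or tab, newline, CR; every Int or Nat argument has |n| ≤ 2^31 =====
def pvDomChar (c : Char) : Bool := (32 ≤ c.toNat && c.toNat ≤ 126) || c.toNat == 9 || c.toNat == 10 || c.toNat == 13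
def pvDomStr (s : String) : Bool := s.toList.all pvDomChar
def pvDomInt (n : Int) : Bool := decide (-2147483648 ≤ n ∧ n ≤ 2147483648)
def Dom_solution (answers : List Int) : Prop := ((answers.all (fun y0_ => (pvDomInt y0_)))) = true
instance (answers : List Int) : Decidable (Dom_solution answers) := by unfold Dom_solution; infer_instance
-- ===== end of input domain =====

-- B replaces A's per-element comparison loop against three patterns by a single pass
-- that builds a histogram keyed by (index mod 40, answer); each score is then read
-- off the 40-entry table (every pattern period divides 40) — alternative algorithm.

-- ===== PORT A =====
-- A-side helper: the body of A's "for i in range(len(answers))" loop (the three ifs on corr)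
def pvBody (answers : List Int) (corr : PySem.Dict Int Int) (i : Int) : PySem.Dict Int Int :=
  let corr := if PySem.List.pyGetD answers i 0 = PySem.List.pyGetD [1,2,3,4,5] (PySem.Int.mod i 5) 0
              then corr.modify 1 0 (· + 1) else corr
  let corr := if PySem.List.pyGetD answers i 0 = PySem.List.pyGetD [2,1,2,3,2,4,2,5] (PySem.Int.mod i 8) 0
              then corr.modify 2 0 (· + 1) else corr
  if PySem.List.pyGetD answers i 0 = PySem.List.pyGetD [3,3,1,1,2,2,4,4,5,5] (PySem.Int.mod i 10) 0
  then corr.modify 3 0 (· + 1) else corr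

def solution (answers : List Int) : List Int :=
  let corr : PySem.Dict Int Int := ((PySem.Dict.empty.insert 1 0).insert 2 0).insert 3 0
  let corr := (PySem.List.pyRange 0 (PySem.List.len answers) 1).foldl (pvBody answers) corr
  let maximum : Int := (PySem.List.max? corr.values (fun v => v)).getD 0
  corr.keys.foldl (fun ans i => if maximum = corr.getD i 0 then ans ++ [i] else ans) []

-- ===== PORT B =====
def solution_alt (answers : List Int) : List Int :=
  let cnt : PySem.Dict (Int × Int) Int :=
    (PySem.List.enumerate answers 0).foldl
      (fun d p =>
        d.insert (PySem.Int.mod p.1 40, p.2) (d.getD (PySem.Int.mod p.1 40, p.2) 0 + 1))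
      PySem.Dict.empty
  let scores : List Int :=
    ([[1,2,3,4,5],[2,1,2,3,2,4,2,5],[3,3,1,1,2,2,4,4,5,5]] : List (List Int)).map (fun pat =>
      ((PySem.List.pyRange 0 40 1).map (fun r =>
        cnt.getD (r, PySem.List.pyGetD pat (PySem.Int.mod r (pat.length : Int)) 0) 0)).sum)
  let m : Int := (PySem.List.max? scores (fun v => v)).getD 0
  (PySem.List.enumerate scores 0).filterMap (fun p => if p.2 = m then some (p.1 + 1) else none)

-- ===== PRECONDITION & SPEC =====
def Spec_solution (answers : List Int) (out : List Int) : Prop := out = solution_alt answers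
instance (answers : List Int) (out : List Int) : Decidable (Spec_solution answers out) := by unfold Spec_solution; infer_instance

-- ===== CLAIM (what is proved, stated in full; the proofs are below) =====
def Claim_equal_solution : Prop := ∀ (answers : List Int), Dom_solution answers → Spec_solution answers (solution answers)

-- ===== LEMMAS AND PROOFS =====

-- proof-only characterisation of a pattern's score, as structural recursion on answers
def pvScore (pat : List Int) (i : Nat) : List Int → Int
  | [] => 0
  | a :: rest => (if a = pat.getD (i % pat.length) 0 then 1 else 0) + pvScore pat (i + 1) rest

theorem pv_upd1 (c : Prop) [Decidable c] (c1 c2 c3 : Int) :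
    (if c then (PySem.Dict.mk [(1,c1),(2,c2),(3,c3)] : PySem.Dict Int Int).modify 1 0 (· + 1)
     else PySem.Dict.mk [(1,c1),(2,c2),(3,c3)]) =
    PySem.Dict.mk [(1, c1 + if c then 1 else 0), (2,c2), (3,c3)] := by
  by_cases h : c <;> simp [h, PySem.Dict.modify, PySem.Dict.contains, PySem.Dict.insert,
    PySem.Dict.getD, PySem.Dict.get?]

theorem pv_upd2 (c : Prop) [Decidable c] (c1 c2 c3 : Int) :
    (if c then (PySem.Dict.mk [(1,c1),(2,c2),(3,c3)] : PySem.Dict Int Int).modify 2 0 (· + 1)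
     else PySem.Dict.mk [(1,c1),(2,c2),(3,c3)]) =
    PySem.Dict.mk [(1,c1), (2, c2 + if c then 1 else 0), (3,c3)] := by
  by_cases h : c <;> simp [h, PySem.Dict.modify, PySem.Dict.contains, PySem.Dict.insert,
    PySem.Dict.getD, PySem.Dict.get?]

theorem pv_upd3 (c : Prop) [Decidable c] (c1 c2 c3 : Int) :
    (if c then (PySem.Dict.mk [(1,c1),(2,c2),(3,c3)] : PySem.Dict Int Int).modify 3 0 (· + 1)
     else PySem.Dict.mk [(1,c1),(2,c2),(3,c3)]) =
    PySem.Dict.mk [(1,c1), (2,c2), (3, c3 + if c then 1 else 0)] := by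
  by_cases h : c <;> simp [h, PySem.Dict.modify, PySem.Dict.contains, PySem.Dict.insert,
    PySem.Dict.getD, PySem.Dict.get?]

theorem pv_loop_inv (all : List Int) (xs : List Int) (s : Nat) (hxs : all.drop s = xs)
    (c1 c2 c3 : Int) :
    (PySem.List.pyRange (s : Int) ((s : Int) + (xs.length : Int)) 1).foldl (pvBody all)
      (PySem.Dict.mk [(1,c1),(2,c2),(3,c3)]) =
    PySem.Dict.mk [(1, c1 + pvScore [1,2,3,4,5] s xs),
                   (2, c2 + pvScore [2,1,2,3,2,4,2,5] s xs),
                   (3, c3 + pvScore [3,3,1,1,2,2,4,4,5,5] s xs)] := by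
  induction xs generalizing s c1 c2 c3 with
  | nil =>
      rw [PySem.List.pyRange_one_eq_nil (by simp)]
      simp [pvScore]
  | cons a rest ih =>
      have hlt : ((s : Int)) < (s : Int) + ((a :: rest).length : Int) := by
        push_cast [List.length_cons]; omega
      rw [PySem.List.pyRange_one_cons hlt, List.foldl_cons]
      have h9 : all[s]? = some a := by
        have h : (List.drop s all)[0]? = all[s + 0]? := List.getElem?_drop
        rw [hxs] at h
        simpa using h.symm
      have hga : PySem.List.pyGetD all (s : Int) 0 = a := by
        simp [PySem.List.pyGetD_natCast, List.getD_eq_getElem?_getD, h9]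
      have hxs' : all.drop (s + 1) = rest := by
        have h : all.drop (s + 1) = (all.drop s).drop 1 := by rw [List.drop_drop]
        rw [h, hxs]; rfl
      have hm5 : PySem.Int.mod (s : Int) 5 = ((s % 5 : Nat) : Int) := by
        exact_mod_cast PySem.Int.mod_natCast s 5
      have hm8 : PySem.Int.mod (s : Int) 8 = ((s % 8 : Nat) : Int) := by
        exact_mod_cast PySem.Int.mod_natCast s 8
      have hm10 : PySem.Int.mod (s : Int) 10 = ((s % 10 : Nat) : Int) := by
        exact_mod_cast PySem.Int.mod_natCast s 10
      have hrange : PySem.List.pyRange ((s : Int) + 1) ((s : Int) + ((a :: rest).length : Int)) 1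
          = PySem.List.pyRange ((s + 1 : Nat) : Int) (((s + 1 : Nat) : Int) + (rest.length : Int)) 1 := by
        congr 1
        push_cast [List.length_cons]
        ring
      have hstep : pvBody all (PySem.Dict.mk [(1,c1),(2,c2),(3,c3)]) (s : Int) =
          PySem.Dict.mk [(1, c1 + if a = [1,2,3,4,5].getD (s % 5) 0 then 1 else 0),
                         (2, c2 + if a = [2,1,2,3,2,4,2,5].getD (s % 8) 0 then 1 else 0),
                         (3, c3 + if a = [3,3,1,1,2,2,4,4,5,5].getD (s % 10) 0 then 1 else 0)] := by
        simp only [pvBody, hga, hm5, hm8, hm10, PySem.List.pyGetD_natCast, pv_upd1, pv_upd2, pv_upd3]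
      rw [hstep, hrange, ih (s + 1) hxs']
      simp only [pvScore, List.length_cons, List.length_nil, PySem.Dict.mk.injEq,
        List.cons.injEq, Prod.mk.injEq, and_true, true_and]
      norm_num
      refine ⟨by ring, by ring, by ring⟩

-- B-side: the fold building cnt is Counter of the key list
theorem pv_cnt_eq_counter (answers : List Int) :
    (PySem.List.enumerate answers 0).foldl
      (fun d p =>
        d.insert (PySem.Int.mod p.1 40, p.2) (d.getD (PySem.Int.mod p.1 40, p.2) 0 + 1))
      PySem.Dict.empty
    = PySem.Dict.counter ((PySem.List.enumerate answers 0).map (fun p => (PySem.Int.mod p.1 40, p.2))) := by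
  rw [← PySem.Dict.foldl_insert_getD_add_one_eq_counter, List.foldl_map]

-- indicator sum over the 40 residues: exactly one residue matches the key's first component
theorem pv_ind_sum (f : Int → Int) (k : Nat) (hk : k < 40) (a : Int) :
    ((PySem.List.pyRange 0 40 1).map (fun r =>
      if ((k : Int), a) = (r, f r) then (1 : Int) else 0)).sum
    = if a = f (k : Int) then 1 else 0 := by
  have hr : PySem.List.pyRange 0 40 1 = (List.range 40).map (fun n : Nat => (n : Int)) := by decide
  by_cases hq : a = f (k : Int)
  · have hpt : ∀ r : Int, (((k : Int), a) = (r, f r)) ↔ ((r == (k : Int)) = true) := by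
      intro r
      simp only [Prod.ext_iff, beq_iff_eq]
      constructor
      · rintro ⟨h1, _⟩; exact h1.symm
      · intro h1; subst h1; exact ⟨rfl, hq⟩
    simp only [hpt, PySem.List.sum_map_ite_one_zero]
    rw [if_pos hq]
    have hc : (PySem.List.pyRange 0 40 1).count ((k : Int)) = 1 := by
      rw [hr, List.count_map_of_injective _ _ (fun a b => by omega)]
      simp [List.count_eq_one_of_mem, List.nodup_range, hk]
    rw [List.count] at hc
    exact_mod_cast hc
  · have hpt : ∀ r : Int, (((k : Int), a) = (r, f r)) ↔ False := by
      intro r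
      simp only [Prod.ext_iff, iff_false, not_and]
      intro h1; rw [← h1]; exact hq
    simp [hpt, hq]

-- score read off the histogram equals the direct pattern score
theorem pv_score_eq (pat : List Int) (hne : pat ≠ []) (hdvd : pat.length ∣ 40)
    (xs : List Int) (s : Nat) :
    ((PySem.List.pyRange 0 40 1).map (fun r =>
      ((((PySem.List.enumerate xs (s : Int)).map (fun p => (PySem.Int.mod p.1 40, p.2))).count
          (r, PySem.List.pyGetD pat (PySem.Int.mod r (pat.length : Int)) 0) : Nat) : Int))).sum
    = pvScore pat s xs := by
  induction xs generalizing s with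
  | nil => simp [PySem.List.enumerate_nil, pvScore, List.map_const']
  | cons a rest ih =>
      have hm40 : PySem.Int.mod (s : Int) 40 = ((s % 40 : Nat) : Int) := by
        exact_mod_cast PySem.Int.mod_natCast s 40
      have hen : (PySem.List.enumerate (a :: rest) (s : Int)).map
            (fun p => (PySem.Int.mod p.1 40, p.2))
          = (((s % 40 : Nat) : Int), a) ::
            (PySem.List.enumerate rest (((s + 1 : Nat) : Int))).map
              (fun p => (PySem.Int.mod p.1 40, p.2)) := by
        rw [PySem.List.enumerate_cons]
        push_cast
        simp
      rw [hen]
      have hsplit : ∀ r : Int,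
          (((((s % 40 : Nat) : Int), a) ::
            (PySem.List.enumerate rest (((s + 1 : Nat) : Int))).map
              (fun p => (PySem.Int.mod p.1 40, p.2))).count
            (r, PySem.List.pyGetD pat (PySem.Int.mod r (pat.length : Int)) 0) : Int)
          = (((PySem.List.enumerate rest (((s + 1 : Nat) : Int))).map
              (fun p => (PySem.Int.mod p.1 40, p.2))).count
              (r, PySem.List.pyGetD pat (PySem.Int.mod r (pat.length : Int)) 0) : Int)
            + (if ((((s % 40 : Nat) : Int), a) : Int × Int)
                  = (r, PySem.List.pyGetD pat (PySem.Int.mod r (pat.length : Int)) 0) then 1 else 0) := by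
        intro r
        rw [List.count_cons]
        by_cases h : ((r, PySem.List.pyGetD pat (PySem.Int.mod r (pat.length : Int)) 0) : Int × Int)
            = ((((s % 40 : Nat) : Int), a))
        · simp [h]
        · have h' : ¬ ((((s % 40 : Nat) : Int), a)
              = (r, PySem.List.pyGetD pat (PySem.Int.mod r (pat.length : Int)) 0)) :=
            fun he => h he.symm
          simp only [beq_iff_eq, if_neg h', Nat.cast_add, add_zero]
      simp only [hsplit]
      rw [PySem.List.sum_map_add_int, ih (s + 1),
        pv_ind_sum (fun r => PySem.List.pyGetD pat (PySem.Int.mod r (pat.length : Int)) 0)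
          (s % 40) (Nat.mod_lt _ (by norm_num)) a]
      have hlen0 : 0 < pat.length := List.length_pos_of_ne_nil hne
      have hmod : PySem.Int.mod (((s % 40 : Nat) : Int)) ((pat.length : Nat) : Int)
          = (((s % 40) % pat.length : Nat) : Int) := PySem.Int.mod_natCast _ _
      have hmm : (s % 40) % pat.length = s % pat.length := Nat.mod_mod_of_dvd s hdvd
      simp only [pvScore, hmod, hmm, PySem.List.pyGetD_natCast]
      ring

-- ===== VERDICT (by name: the statement is the Claim_ definition above) =====
theorem solution_spec : Claim_equal_solution := by
  intro answers _
  unfold Spec_solution solution solution_alt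
  have hinit : ((PySem.Dict.empty.insert 1 0).insert 2 0).insert 3 0
      = (PySem.Dict.mk [((1:Int),(0:Int)),(2,0),(3,0)]) := by decide
  have hinv := pv_loop_inv answers answers 0 rfl 0 0 0
  simp only [Nat.cast_zero, zero_add] at hinv
  rw [hinit]
  simp only [PySem.List.len_eq, hinv]
  simp only [PySem.Dict.values, List.map_cons, List.map_nil]
  have h1 := pv_score_eq [1,2,3,4,5] (by decide) (by decide) answers 0
  have h2 := pv_score_eq [2,1,2,3,2,4,2,5] (by decide) (by decide) answers 0
  have h3 := pv_score_eq [3,3,1,1,2,2,4,4,5,5] (by decide) (by decide) answers 0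
  simp only [Nat.cast_zero] at h1 h2 h3
  simp only [pv_cnt_eq_counter, PySem.Dict.getD_counter, h1, h2, h3]
  generalize pvScore [1,2,3,4,5] 0 answers = s1
  generalize pvScore [2,1,2,3,2,4,2,5] 0 answers = s2
  generalize pvScore [3,3,1,1,2,2,4,4,5,5] 0 answers = s3
  obtain ⟨m, hm⟩ : ∃ m, (PySem.List.max? [s1, s2, s3] (fun v => v)).getD 0 = m := ⟨_, rfl⟩
  simp only [hm]
  rcases eq_or_ne s1 m with e1 | e1 <;> rcases eq_or_ne s2 m with e2 | e2 <;>
    rcases eq_or_ne s3 m with e3 | e3 <;>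
    simp [PySem.Dict.keys, PySem.Dict.getD, PySem.Dict.get?, PySem.List.enumerate,
      List.foldl, List.filterMap, e1, e2, e3, eq_comm (a := m)]
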